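-- pv_equiv track=rewrite | github.com/FireAnts-PSU-Capstone-team/capstone | validation.py | validateEndorsement
-- ===== SOURCE A (Python) =====
-- valid_endorsements = ["CT", "ED", "EX", "TO"]
--
-- def validateEndorsement(endorsementList):
--     # validates that each of the involved substrings are one of the endorse types and none are repeated.
--     stringEndorsement = str(endorsementList).upper()
--     if len(stringEndorsement) == 0 or stringEndorsement.lower() == 'nan':  # This is a valid outcome
--         return True
--     splitEndorse = stringEndorsement.split(',')
--     # keep track of seen items
--     endorsement_counts = {}
--     for item in splitEndorse:
--         # if we haven't seen the item before, set count to 0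
--         if item not in endorsement_counts:
--             endorsement_counts[item] = 0
--         # if item is valid, increment counter
--         if item in valid_endorsements:
--             endorsement_counts[item] += 1
--         else:
--             return False
--         # if we've already seen the item, reject it
--         if endorsement_counts[item] > 1:
--             return False
--     return True
-- ===== SOURCE B (Python) =====
-- valid_endorsements = ["CT", "ED", "EX", "TO"]
--
-- def validateEndorsement(endorsementList):
--     stringEndorsement = str(endorsementList).upper()
--     if len(stringEndorsement) == 0 or stringEndorsement.lower() == 'nan':
--         return True
--     splitEndorse = stringEndorsement.split(',')
--     # valid items, no repeats: two aggregate checks instead of a counting loop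
--     return (all(item in valid_endorsements for item in splitEndorse)
--             and len(set(splitEndorse)) == len(splitEndorse))
-- ===== Notes on version B (the rewrite author's own statement) =====
-- stated objective: simpler
-- what changed: The per-item counting loop with a maintained dict and two early-return checks is replaced by two aggregate passes: every split item must be a valid endorsement and the set of items must have the same length as the list (no repeats).
import Mathlib
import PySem

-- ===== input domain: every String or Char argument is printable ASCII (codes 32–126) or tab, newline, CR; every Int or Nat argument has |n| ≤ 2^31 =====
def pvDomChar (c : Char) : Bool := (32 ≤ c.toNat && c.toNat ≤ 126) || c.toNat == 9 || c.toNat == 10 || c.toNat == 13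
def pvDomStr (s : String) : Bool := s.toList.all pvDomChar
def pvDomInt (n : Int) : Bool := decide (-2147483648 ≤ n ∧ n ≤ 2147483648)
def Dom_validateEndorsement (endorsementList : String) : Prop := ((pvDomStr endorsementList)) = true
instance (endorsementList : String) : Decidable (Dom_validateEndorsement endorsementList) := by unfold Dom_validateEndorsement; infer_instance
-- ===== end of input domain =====

-- B replaces A's count-tracking dict loop by two aggregate checks (all items valid, set size = list size); objective: simpler.

-- module constant shared by both Pythons
def valid_endorsements : List String := ["CT", "ED", "EX", "TO"]

-- ===== PORT A =====
-- the for-loop over splitEndorse maintaining endorsement_counts, with its early returns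
def vLoopA : PySem.Dict String Int → List String → Bool
  | _, [] => true
  | counts, item :: rest =>
    -- if item not in endorsement_counts: endorsement_counts[item] = 0
    let counts1 := if !(counts.contains item) then counts.insert item 0 else counts
    if valid_endorsements.contains item then
      -- endorsement_counts[item] += 1
      let counts2 := counts1.modify item 0 (· + 1)
      if counts2.getD item 0 > 1 then false else vLoopA counts2 rest
    else false

def validateEndorsement (endorsementList : String) : Bool :=
  let stringEndorsement := PySem.Str.upper endorsementList
  if PySem.Str.len stringEndorsement == 0 || PySem.Str.lower stringEndorsement == "nan" then true
  else
    let splitEndorse := (PySem.Str.split? stringEndorsement ",").getD []  -- sep "," ≠ "": split? is always some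
    vLoopA PySem.Dict.empty splitEndorse

-- ===== PORT B =====
def validateEndorsement_alt (endorsementList : String) : Bool :=
  let stringEndorsement := PySem.Str.upper endorsementList
  if PySem.Str.len stringEndorsement == 0 || PySem.Str.lower stringEndorsement == "nan" then true
  else
    let splitEndorse := (PySem.Str.split? stringEndorsement ",").getD []  -- sep "," ≠ "": split? is always some
    (splitEndorse.all fun item => valid_endorsements.contains item) &&
      (PySem.Set.len (PySem.Set.ofList splitEndorse) == (splitEndorse.length : Int))

-- ===== PRECONDITION & SPEC =====
def Spec_validateEndorsement (endorsementList : String) (out : Bool) : Prop := out = validateEndorsement_alt endorsementList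
instance (endorsementList : String) (out : Bool) : Decidable (Spec_validateEndorsement endorsementList out) := by unfold Spec_validateEndorsement; infer_instance

-- ===== CLAIM (what is proved, stated in full; the proofs are below) =====
def Claim_equal_validateEndorsement : Prop := ∀ (endorsementList : String), Dom_validateEndorsement endorsementList → Spec_validateEndorsement endorsementList (validateEndorsement endorsementList)

-- ===== LEMMAS AND PROOFS =====

-- A's loop, over any dict whose stored counts are ≥ 1, succeeds iff all items are valid,
-- pairwise distinct, and absent from the dict.
lemma vLoopA_char : ∀ (items : List String) (counts : PySem.Dict String Int),
    (∀ k, counts.contains k = true → 1 ≤ counts.getD k 0) →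
    vLoopA counts items =
      ((items.all fun i => valid_endorsements.contains i) &&
        decide (items.Nodup ∧ ∀ i ∈ items, counts.contains i = false))
  | [], counts, _ => by simp [vLoopA]
  | item :: rest, counts, hv => by
    by_cases hval : valid_endorsements.contains item = true
    · by_cases hmem : counts.contains item = true
      · -- item already seen: count reaches 2 and the loop returns False
        have h1 : 1 ≤ counts.getD item 0 := hv item hmem
        simp only [vLoopA, hmem, Bool.not_true, Bool.false_eq_true, if_false, hval, if_true,
          PySem.Dict.getD_modify_self]
        rw [if_pos (by omega)]
        simp [hmem]
      · -- fresh item: inserted with 0, bumped to 1, loop continues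
        have hc2 : ∀ k, ((counts.insert item 0).modify item 0 (· + 1)).contains k =
            (k == item || counts.contains k) := by
          intro k
          rw [PySem.Dict.contains_modify, PySem.Dict.contains_insert, ← Bool.or_assoc,
            Bool.or_self]
        have hv' : ∀ k, ((counts.insert item 0).modify item 0 (· + 1)).contains k = true →
            1 ≤ ((counts.insert item 0).modify item 0 (· + 1)).getD k 0 := by
          intro k hk
          rw [hc2] at hk
          by_cases hki : k = item
          · subst hki
            rw [PySem.Dict.getD_modify_self, PySem.Dict.getD_insert_self]
            omega
          · rw [PySem.Dict.getD_modify_of_ne _ _ _ hki, PySem.Dict.getD_insert_of_ne _ _ _ hki]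
            apply hv
            simpa [hki] using hk
        simp only [vLoopA, hmem, Bool.not_false, if_true, hval,
          PySem.Dict.getD_modify_self, PySem.Dict.getD_insert_self]
        rw [if_neg (by omega), vLoopA_char rest _ hv']
        simp only [List.all_cons, hval, Bool.true_and]
        congr 1
        rw [decide_eq_decide]
        simp only [hc2, List.nodup_cons, List.forall_mem_cons, Bool.or_eq_false_iff,
          beq_eq_false_iff_ne, ne_eq]
        have hmemf : counts.contains item = false := by
          revert hmem; cases counts.contains item <;> simp
        constructor
        · rintro ⟨hn, hall⟩
          exact ⟨⟨fun hm => (hall item hm).1 rfl, hn⟩, hmemf,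
            fun x hx => (hall x hx).2⟩
        · rintro ⟨⟨hnm, hn⟩, -, hall⟩
          exact ⟨hn, fun i hi => ⟨fun he => hnm (he ▸ hi), hall i hi⟩⟩
    · -- invalid item: both sides are False
      have hvf : valid_endorsements.contains item = false := by
        revert hval; cases valid_endorsements.contains item <;> simp
      simp only [vLoopA, hvf, Bool.false_eq_true, if_false, List.all_cons, Bool.false_and]

-- len(set(l)) == len(l) characterises "no repeats"
lemma ofList_len_iff (l : List String) : (PySem.Set.ofList l).length = l.length ↔ l.Nodup := by
  constructor
  · intro h
    have hnd := PySem.Set.nodup_ofList l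
    have hp : (PySem.Set.ofList l).Perm l.dedup := by
      refine (List.subperm_of_subset hnd ?_).antisymm (List.subperm_of_subset (List.nodup_dedup l) ?_)
      · intro x hx
        exact List.mem_dedup.2 ((PySem.Set.mem_ofList l x).1 hx)
      · intro x hx
        exact (PySem.Set.mem_ofList l x).2 ((List.dedup_sublist l).subset hx)
    have hlen : l.dedup.length = l.length := by rw [← hp.length_eq, h]
    exact List.dedup_eq_self.1 ((List.dedup_sublist l).eq_of_length hlen)
  · intro h
    rw [PySem.Set.ofList_eq_self_of_nodup l h]

-- ===== VERDICT (by name: the statement is the Claim_ definition above) =====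
set_option maxHeartbeats 800000 in
theorem validateEndorsement_spec : Claim_equal_validateEndorsement := by
  intro s _
  unfold Spec_validateEndorsement validateEndorsement validateEndorsement_alt
  by_cases hg : (PySem.Str.len (PySem.Str.upper s) == 0
      || PySem.Str.lower (PySem.Str.upper s) == "nan") = true
  · simp only [hg, if_true]
  · simp only [Bool.not_eq_true] at hg
    simp only [hg, Bool.false_eq_true, if_false]
    rw [vLoopA_char _ PySem.Dict.empty
      (by intro k hk; rw [PySem.Dict.contains_empty] at hk; cases hk)]
    rw [Bool.eq_iff_iff]
    simp only [Bool.and_eq_true, decide_eq_true_eq, beq_iff_eq, PySem.Set.len,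
      Nat.cast_inj, PySem.Dict.contains_empty]
    rw [ofList_len_iff]
    tauto
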